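-- pv_equiv track=rewrite | github.com/deryann/pyExamDB | PyQuestionEditor/QDbReport/RunForAllQuestionWordCloud.py | skipAllMathMode
-- ===== SOURCE A (Python) =====
-- def skipAllMathMode(strInput):
--     lst = strInput.split(u'$')
--     nSplit =len(lst)
--     strR = u''
--     #TODO: Handle /$ case
--
--     for i in range(nSplit):
--         if (i%2)==0:
--             #It is in text mode
--             strR +=(u' ' + lst[i])
--             pass
--         elif (i%2)==1:
--             #It is in math mode
--             #strR += (u"$" + lst[i]+ u"$")
--             pass
--
--     return strR
-- ===== SOURCE B (Python) =====
-- def skipAllMathMode(strInput):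
--     out = [' ']
--     count = 0
--     for ch in strInput:
--         if ch == '$':
--             count += 1
--             if count % 2 == 0:
--                 out.append(' ')
--         elif count % 2 == 0:
--             out.append(ch)
--     return ''.join(out)
-- ===== Notes on version B (the rewrite author's own statement) =====
-- stated objective: simpler
-- what changed: Replaces split-on-'$' plus an indexed parity loop over the segment list with one left-to-right character scan that counts '$'s and emits a character (or a separator space) based on the count's parity.
import Mathlib
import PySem

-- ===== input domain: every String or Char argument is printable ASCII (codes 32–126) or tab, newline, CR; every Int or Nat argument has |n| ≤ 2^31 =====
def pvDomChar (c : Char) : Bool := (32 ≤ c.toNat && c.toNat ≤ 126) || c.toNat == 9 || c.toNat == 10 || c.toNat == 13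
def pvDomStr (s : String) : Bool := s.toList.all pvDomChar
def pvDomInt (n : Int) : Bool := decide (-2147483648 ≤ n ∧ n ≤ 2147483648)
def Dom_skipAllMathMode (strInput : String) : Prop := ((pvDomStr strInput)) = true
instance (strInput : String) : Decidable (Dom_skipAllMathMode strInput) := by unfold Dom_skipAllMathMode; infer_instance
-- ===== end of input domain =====

-- B replaces A's split-on-'$' + even-index selection with a single character scan keyed on '$'-count parity (objective: simpler).

-- ===== PORT A =====
def skipAllMathMode (strInput : String) : String :=
  let lst := PySem.Chars.splitOn strInput.toList "$".toList
  let nSplit := lst.length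
  let strR := (PySem.List.pyRange 0 (nSplit : Int) 1).foldl
    (fun strR i =>
      if PySem.Int.mod i 2 = 0 then strR ++ ' ' :: PySem.List.pyGetD lst i []
      else strR) []
  String.ofList strR

-- ===== PORT B =====
def skipAllMathMode_alt (strInput : String) : String :=
  let st := strInput.toList.foldl
    (fun (st : Nat × List Char) ch =>
      if ch = '$' then
        let count := st.1 + 1
        (count, if count % 2 = 0 then st.2 ++ [' '] else st.2)
      else
        (st.1, if st.1 % 2 = 0 then st.2 ++ [ch] else st.2))
    (0, [' '])
  String.ofList st.2

-- ===== PRECONDITION & SPEC =====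
def Spec_skipAllMathMode (strInput : String) (out : String) : Prop := out = skipAllMathMode_alt strInput
instance (strInput : String) (out : String) : Decidable (Spec_skipAllMathMode strInput out) := by unfold Spec_skipAllMathMode; infer_instance

-- ===== CLAIM (what is proved, stated in full; the proofs are below) =====
def Claim_equal_skipAllMathMode : Prop := ∀ (strInput : String), Dom_skipAllMathMode strInput → Spec_skipAllMathMode strInput (skipAllMathMode strInput)

-- ===== LEMMAS AND PROOFS =====

-- first '$'-free segment and the remaining segments of the split (proof-side characterisation)
def pvSplitD : List Char → List Char × List (List Char)
  | [] => ([], [])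
  | c :: cs =>
    let p := pvSplitD cs
    if c = '$' then ([], p.1 :: p.2) else (c :: p.1, p.2)

-- concatenation of the even-position segments, each prefixed by a space (b = "current position is even")
def pvEvenCat : List (List Char) → Bool → List Char
  | [], _ => []
  | s :: rest, b => if b then ' ' :: (s ++ pvEvenCat rest false) else pvEvenCat rest true

-- what B's scan emits from cs when the current '$'-count parity is "even" = b
def pvEmit : List Char → Bool → List Char
  | [], _ => []
  | c :: cs, b =>
    if c = '$' then (if b then pvEmit cs false else ' ' :: pvEmit cs true)
    else (if b then c :: pvEmit cs b else pvEmit cs b)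

theorem pv_go_eq (l : List Char) : ∀ (fuel : Nat) (cur : List Char) (acc : List (List Char)),
    l.length < fuel →
    PySem.Chars.splitOn.go ['$'] fuel l cur acc
      = acc.reverse ++ (cur.reverse ++ (pvSplitD l).1) :: (pvSplitD l).2 := by
  induction l with
  | nil =>
    intro fuel cur acc h
    match fuel, h with
    | fuel + 1, _ => simp [PySem.Chars.splitOn.go, pvSplitD]
  | cons c cs ih =>
    intro fuel cur acc h
    match fuel, h with
    | fuel + 1, h =>
      by_cases hc : c = '$'
      · subst hc
        rw [PySem.Chars.splitOn.go]
        simp only [List.isPrefixOf, beq_self_eq_true, Bool.true_and, if_true,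
          List.length_cons, List.drop_succ_cons, List.length_nil, List.drop_zero]
        rw [ih fuel [] ((cur.reverse) :: acc) (by simpa using Nat.lt_of_succ_lt_succ h)]
        simp [pvSplitD]
      · rw [PySem.Chars.splitOn.go]
        have hbeq : ('$' == c) = false := beq_false_of_ne (Ne.symm hc)
        have hpre : List.isPrefixOf ['$'] (c :: cs) = false := by
          simp [List.isPrefixOf, hbeq]
        rw [hpre]
        simp only [Bool.false_eq_true, if_false]
        rw [ih fuel (c :: cur) acc (by simpa using Nat.lt_of_succ_lt_succ h)]
        simp [pvSplitD, hc]

theorem pv_splitOn_eq (cs : List Char) :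
    PySem.Chars.splitOn cs ['$'] = (pvSplitD cs).1 :: (pvSplitD cs).2 := by
  unfold PySem.Chars.splitOn
  rw [pv_go_eq cs (cs.length + 1) [] [] (Nat.lt_succ_self _)]
  simp

theorem pv_foldA (lst : List (List Char)) : ∀ (k j : Nat) (acc : List Char), j + k = lst.length →
    (PySem.List.pyRange (j : Int) (lst.length : Int) 1).foldl
      (fun strR i =>
        if PySem.Int.mod i 2 = 0 then strR ++ ' ' :: PySem.List.pyGetD lst i []
        else strR) acc
      = acc ++ pvEvenCat (lst.drop j) (j % 2 == 0) := by
  intro k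
  induction k with
  | zero =>
    intro j acc h
    rw [PySem.List.pyRange_one_eq_nil (by omega)]
    simp [List.drop_eq_nil_of_le (by omega : lst.length ≤ j), pvEvenCat]
  | succ k ih =>
    intro j acc h
    have hj : j < lst.length := by omega
    rw [PySem.List.pyRange_one_cons (by exact_mod_cast hj)]
    simp only [List.foldl_cons]
    have hcast : ((j : Int) + 1) = ((j + 1 : Nat) : Int) := by push_cast; ring
    have hdrop : lst.drop j = lst[j] :: lst.drop (j + 1) := List.drop_eq_getElem_cons hj
    have hget : PySem.List.pyGetD lst (j : Int) [] = lst[j] := by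
      simp [PySem.List.pyGetD_natCast, List.getElem?_eq_getElem hj]
    have hm : PySem.Int.mod (j : Int) 2 = ((j % 2 : Nat) : Int) := by
      exact_mod_cast PySem.Int.mod_natCast j 2
    by_cases hpar : j % 2 = 0
    · rw [if_pos (by rw [hm, hpar]; rfl)]
      rw [hcast, ih (j + 1) _ (by omega)]
      have hb1 : ((j + 1) % 2 == 0) = false := beq_eq_false_iff_ne.mpr (by omega)
      have hb0 : (j % 2 == 0) = true := beq_iff_eq.mpr hpar
      rw [hget, hdrop, hb1, hb0]
      simp [pvEvenCat]
    · rw [if_neg (by rw [hm]; exact_mod_cast hpar)]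
      rw [hcast, ih (j + 1) _ (by omega)]
      have hb1 : ((j + 1) % 2 == 0) = true := beq_iff_eq.mpr (by omega)
      have hb0 : (j % 2 == 0) = false := beq_eq_false_iff_ne.mpr hpar
      rw [hdrop, hb1, hb0]
      simp [pvEvenCat]

theorem pv_bridge (cs : List Char) :
    pvEmit cs true = (pvSplitD cs).1 ++ pvEvenCat (pvSplitD cs).2 false
      ∧ pvEmit cs false = pvEvenCat (pvSplitD cs).2 true := by
  induction cs with
  | nil => simp [pvEmit, pvSplitD, pvEvenCat]
  | cons c cs ih =>
    by_cases hc : c = '$'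
    · subst hc
      simp only [pvEmit, pvSplitD, reduceIte]
      constructor
      · simpa [pvEvenCat] using ih.2
      · simp [pvEvenCat, ih.1]
    · simp [pvEmit, pvSplitD, hc, ih.1, ih.2]

theorem pv_foldB (cs : List Char) : ∀ (cnt : Nat) (out : List Char),
    (cs.foldl
      (fun (st : Nat × List Char) ch =>
        if ch = '$' then
          (st.1 + 1, if (st.1 + 1) % 2 = 0 then st.2 ++ [' '] else st.2)
        else
          (st.1, if st.1 % 2 = 0 then st.2 ++ [ch] else st.2))
      (cnt, out)).2
      = out ++ pvEmit cs (cnt % 2 == 0) := by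
  induction cs with
  | nil => intro cnt out; simp [pvEmit]
  | cons c cs ih =>
    intro cnt out
    by_cases hc : c = '$'
    · subst hc
      simp only [List.foldl_cons, reduceIte]
      by_cases hpar : cnt % 2 = 0
      · rw [if_neg (by omega : ¬ (cnt + 1) % 2 = 0), ih (cnt + 1) out,
          beq_eq_false_iff_ne.mpr (by omega : (cnt + 1) % 2 ≠ 0),
          beq_iff_eq.mpr hpar]
        simp [pvEmit]
      · rw [if_pos (by omega : (cnt + 1) % 2 = 0), ih (cnt + 1) (out ++ [' ']),
          beq_iff_eq.mpr (by omega : (cnt + 1) % 2 = 0),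
          beq_eq_false_iff_ne.mpr hpar]
        simp [pvEmit]
    · simp only [List.foldl_cons]
      rw [if_neg hc]
      by_cases hpar : cnt % 2 = 0
      · rw [if_pos hpar, ih cnt (out ++ [c]), beq_iff_eq.mpr hpar]
        simp [pvEmit, hc]
      · rw [if_neg hpar, ih cnt out, beq_eq_false_iff_ne.mpr hpar]
        simp [pvEmit, hc]

-- ===== VERDICT (by name: the statement is the Claim_ definition above) =====
theorem skipAllMathMode_spec : Claim_equal_skipAllMathMode := by
  intro strInput _
  unfold Spec_skipAllMathMode skipAllMathMode skipAllMathMode_alt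
  simp only []
  have hsep : "$".toList = ['$'] := rfl
  rw [hsep, pv_splitOn_eq strInput.toList]
  have hA := pv_foldA ((pvSplitD strInput.toList).1 :: (pvSplitD strInput.toList).2)
      ((pvSplitD strInput.toList).1 :: (pvSplitD strInput.toList).2).length 0 [] (by omega)
  simp only [Nat.cast_zero, List.drop_zero, Nat.zero_mod, List.nil_append] at hA
  rw [hA]
  rw [pv_foldB strInput.toList 0 [' ']]
  simp only [Nat.zero_mod, beq_self_eq_true]
  rw [(pv_bridge strInput.toList).1]
  simp [pvEvenCat]
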